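-- pv_equiv track=rewrite | github.com/Vastrusa/ProgettoICON | Backend/app.py | calcola_triage
-- ===== SOURCE A (Python) =====
-- priorita_map = {"Rosso": 1, "Giallo": 2, "Verde": 3, "Bianco": 4}
--
-- def calcola_triage(sintomi_ids, sat_id, fc_id):
--     triage_finale = "Bianco"
--
--     triage_sintomi = {
--         "DifficoltaRespiratoria1": "Rosso",
--         "DoloreToracico1": "Rosso",
--         "Febbre1": "Giallo",
--         "Raffreddore1": "Bianco",
--         "Trauma1": "Giallo"
--     }
--
--     triage_saturazione = {
--         "Saturazione1": "Rosso",
--         "Saturazione2": "Giallo",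
--         "Saturazione3": "Verde"
--     }
--
--     triage_fc = {
--         "FCminore40": "Rosso",
--         "FC40-49": "Giallo",
--         "FC50-59": "Verde",
--         "FC60-100": "Bianco",
--         "FC101-120": "Verde",
--         "FC121-140": "Giallo",
--         "FCMaggiore140": "Rosso"
--     }
--
--     # Sintomi
--     for s in sintomi_ids:
--         if s in triage_sintomi:
--             if priorita_map[triage_sintomi[s]] < priorita_map[triage_finale]:
--                 triage_finale = triage_sintomi[s]
--
--     # Saturazione
--     if sat_id and sat_id in triage_saturazione:
--         if priorita_map[triage_saturazione[sat_id]] < priorita_map[triage_finale]: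
--             triage_finale = triage_saturazione[sat_id]
--
--     # Frequenza cardiaca
--     if fc_id and fc_id in triage_fc:
--         if priorita_map[triage_fc[fc_id]] < priorita_map[triage_finale]:
--             triage_finale = triage_fc[fc_id]
--
--     return triage_finale
-- ===== SOURCE B (Python) =====
-- def calcola_triage(sintomi_ids, sat_id, fc_id):
--     # Inverted tables: for each colour (most urgent first), the trigger ids that produce it.
--     # A colour wins as soon as any of its triggers is present, so scan colours in severity
--     # order and return at the first hit; "Bianco" triggers never beat the default, so they
--     # need no entry.
--     livelli = [
--         ("Rosso",  ("DifficoltaRespiratoria1", "DoloreToracico1"),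
--                    ("Saturazione1",),
--                    ("FCminore40", "FCMaggiore140")),
--         ("Giallo", ("Febbre1", "Trauma1"),
--                    ("Saturazione2",),
--                    ("FC40-49", "FC121-140")),
--         ("Verde",  (),
--                    ("Saturazione3",),
--                    ("FC50-59", "FC101-120")),
--     ]
--     for colore, sy, sa, fc in livelli:
--         if any(s in sy for s in sintomi_ids) or sat_id in sa or fc_id in fc:
--             return colore
--     return "Bianco"
-- ===== Notes on version B (the rewrite author's own statement) =====
-- stated objective: alternative
-- what changed: Inverts the id->colour tables into colour->trigger-id tables and scans the colours in severity order (Rosso, Giallo, Verde), returning the first colour one of whose triggers is present; no priority numbers, no running minimum.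
import Mathlib
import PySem

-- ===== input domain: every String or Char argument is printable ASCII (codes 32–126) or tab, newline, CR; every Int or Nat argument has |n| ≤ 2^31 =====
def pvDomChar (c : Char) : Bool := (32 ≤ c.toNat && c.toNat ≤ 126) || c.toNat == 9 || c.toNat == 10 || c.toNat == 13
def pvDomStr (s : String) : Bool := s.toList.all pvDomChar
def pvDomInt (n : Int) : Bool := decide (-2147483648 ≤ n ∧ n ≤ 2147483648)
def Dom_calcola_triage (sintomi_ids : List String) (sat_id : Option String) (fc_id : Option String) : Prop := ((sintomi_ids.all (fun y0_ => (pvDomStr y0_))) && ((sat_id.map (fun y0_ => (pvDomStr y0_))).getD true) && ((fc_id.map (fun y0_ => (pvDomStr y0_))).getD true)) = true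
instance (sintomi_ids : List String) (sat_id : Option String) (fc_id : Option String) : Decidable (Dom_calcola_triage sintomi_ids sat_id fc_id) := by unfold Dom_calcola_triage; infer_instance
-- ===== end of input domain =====

-- B inverts the id->colour tables into colour->trigger-id tables and scans the colours in
-- severity order, returning at the first hit (objective: alternative algorithm, same cost).

-- ===== PORT A =====
-- module-level priorita_map and A's three literal local tables
def pvPrioritaMap : PySem.Dict String Int :=
  PySem.Dict.mk [("Rosso", 1), ("Giallo", 2), ("Verde", 3), ("Bianco", 4)]

def pvTriageSintomi : PySem.Dict String String :=
  PySem.Dict.mk [("DifficoltaRespiratoria1", "Rosso"), ("DoloreToracico1", "Rosso"),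
                 ("Febbre1", "Giallo"), ("Raffreddore1", "Bianco"), ("Trauma1", "Giallo")]

def pvTriageSat : PySem.Dict String String :=
  PySem.Dict.mk [("Saturazione1", "Rosso"), ("Saturazione2", "Giallo"), ("Saturazione3", "Verde")]

def pvTriageFc : PySem.Dict String String :=
  PySem.Dict.mk [("FCminore40", "Rosso"), ("FC40-49", "Giallo"), ("FC50-59", "Verde"),
                 ("FC60-100", "Bianco"), ("FC101-120", "Verde"), ("FC121-140", "Giallo"),
                 ("FCMaggiore140", "Rosso")]

-- priorita_map[c]; every key A looks up is present, so the default 0 is never reached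
def pvPm (c : String) : Int := (pvPrioritaMap.get? c).getD 0

-- A's per-candidate update: 'if s in table: if pm[table[s]] < pm[tf]: tf = table[s]'
def pvStepA (d : PySem.Dict String String) (tf s : String) : String :=
  match d.get? s with
  | some c => if pvPm c < pvPm tf then c else tf
  | none => tf

def calcola_triage (sintomi_ids : List String) (sat_id : Option String) (fc_id : Option String) : String :=
  let tf := sintomi_ids.foldl (pvStepA pvTriageSintomi) "Bianco"
  -- 'if sat_id and sat_id in triage_saturazione: …' (falsy = None or "")
  let tf := match sat_id with
    | some sid => if sid ≠ "" then pvStepA pvTriageSat tf sid else tf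
    | none => tf
  let tf := match fc_id with
    | some fid => if fid ≠ "" then pvStepA pvTriageFc tf fid else tf
    | none => tf
  tf

-- ===== PORT B =====
-- B's 'livelli' table: (colour, symptom triggers, saturation triggers, FC triggers),
-- most urgent colour first; Python tuples of strings become lists
def pvLivelli : List (String × List String × List String × List String) :=
  [("Rosso",  ["DifficoltaRespiratoria1", "DoloreToracico1"], ["Saturazione1"], ["FCminore40", "FCMaggiore140"]),
   ("Giallo", ["Febbre1", "Trauma1"], ["Saturazione2"], ["FC40-49", "FC121-140"]),
   ("Verde",  [], ["Saturazione3"], ["FC50-59", "FC101-120"])]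

-- 'any(s in sy for s in sintomi_ids) or sat_id in sa or fc_id in fc'
-- ('None in tuple-of-strings' is False, hence the match on the Option)
def pvHit (sintomi_ids : List String) (sat_id fc_id : Option String)
    (t : String × List String × List String × List String) : Bool :=
  sintomi_ids.any (fun s => t.2.1.contains s)
    || (match sat_id with | some x => t.2.2.1.contains x | none => false)
    || (match fc_id with | some x => t.2.2.2.contains x | none => false)

-- the 'for … return colore' early-exit loop is List.find?; 'return "Bianco"' is the none case
def calcola_triage_alt (sintomi_ids : List String) (sat_id : Option String) (fc_id : Option String) : String :=
  match pvLivelli.find? (pvHit sintomi_ids sat_id fc_id) with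
  | some t => t.1
  | none => "Bianco"

-- ===== PRECONDITION & SPEC =====
def Spec_calcola_triage (sintomi_ids : List String) (sat_id : Option String) (fc_id : Option String) (out : String) : Prop := out = calcola_triage_alt sintomi_ids sat_id fc_id
instance (sintomi_ids : List String) (sat_id : Option String) (fc_id : Option String) (out : String) : Decidable (Spec_calcola_triage sintomi_ids sat_id fc_id out) := by unfold Spec_calcola_triage; infer_instance

-- ===== CLAIM (what is proved, stated in full; the proofs are below) =====
def Claim_equal_calcola_triage : Prop := ∀ (sintomi_ids : List String) (sat_id : Option String) (fc_id : Option String), Dom_calcola_triage sintomi_ids sat_id fc_id → Spec_calcola_triage sintomi_ids sat_id fc_id (calcola_triage sintomi_ids sat_id fc_id)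

-- ===== LEMMAS AND PROOFS =====

def pvNames : List String := ["Rosso", "Giallo", "Verde", "Bianco"]

-- the lists of numeric contributions of the three stages of A, in closed form
def pvL1 (ids : List String) : List Int :=
  ids.filterMap (fun s => (pvTriageSintomi.get? s).map pvPm)
def pvL2 (oid : Option String) : List Int :=
  match oid with
  | some x => if x = "Saturazione1" then [1] else if x = "Saturazione2" then [2]
      else if x = "Saturazione3" then [3] else []
  | none => []
def pvL3 (oid : Option String) : List Int :=
  match oid with
  | some x => if x = "FCminore40" then [1] else if x = "FC40-49" then [2]
      else if x = "FC50-59" then [3] else if x = "FC60-100" then [4]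
      else if x = "FC101-120" then [3] else if x = "FC121-140" then [2]
      else if x = "FCMaggiore140" then [1] else []
  | none => []

lemma pvSint_names (s c : String) (h : pvTriageSintomi.get? s = some c) : c ∈ pvNames := by
  simp only [pvTriageSintomi, PySem.Dict.get?_mk_cons] at h
  split_ifs at h <;> simp_all [pvNames] <;> simp [PySem.Dict.get?] at h

lemma pvSat_names (s c : String) (h : pvTriageSat.get? s = some c) : c ∈ pvNames := by
  simp only [pvTriageSat, PySem.Dict.get?_mk_cons] at h
  split_ifs at h <;> simp_all [pvNames] <;> simp [PySem.Dict.get?] at h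

lemma pvFc_names (s c : String) (h : pvTriageFc.get? s = some c) : c ∈ pvNames := by
  simp only [pvTriageFc, PySem.Dict.get?_mk_cons] at h
  split_ifs at h <;> simp_all [pvNames] <;> simp [PySem.Dict.get?] at h

lemma pvStepA_min (d : PySem.Dict String String)
    (hd : ∀ s c, d.get? s = some c → c ∈ pvNames) (tf s : String) (htf : tf ∈ pvNames) :
    pvStepA d tf s ∈ pvNames ∧
      pvPm (pvStepA d tf s) =
        (match d.get? s with
         | some c => min (pvPm tf) (pvPm c)
         | none => pvPm tf) := by
  unfold pvStepA
  cases h : d.get? s with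
  | none => exact ⟨htf, rfl⟩
  | some c =>
    dsimp only
    refine ⟨?_, ?_⟩
    · split_ifs with hlt
      · exact hd s c h
      · exact htf
    · rw [min_def]; split_ifs <;> omega

lemma pvFold_sint (l : List String) :
    ∀ tf, tf ∈ pvNames →
      l.foldl (pvStepA pvTriageSintomi) tf ∈ pvNames ∧
        pvPm (l.foldl (pvStepA pvTriageSintomi) tf) = (pvL1 l).foldl min (pvPm tf) := by
  induction l with
  | nil => intro tf htf; exact ⟨htf, rfl⟩
  | cons s rest ih =>
    intro tf htf
    obtain ⟨h1, h2⟩ := pvStepA_min pvTriageSintomi pvSint_names tf s htf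
    obtain ⟨h3, h4⟩ := ih (pvStepA pvTriageSintomi tf s) h1
    refine ⟨h3, ?_⟩
    simp only [pvL1] at h4 ⊢
    cases h : pvTriageSintomi.get? s with
    | none =>
      simp only [List.filterMap_cons, h, Option.map_none, List.foldl_cons]
      rw [h4, h2, h]
    | some c =>
      simp only [List.filterMap_cons, h, Option.map_some, List.foldl_cons]
      rw [h4, h2, h]

-- closed forms of the three table-lookup-then-pm maps
lemma pvSintPm (s : String) : (pvTriageSintomi.get? s).map pvPm =
    (if s = "DifficoltaRespiratoria1" then some 1 else if s = "DoloreToracico1" then some 1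
     else if s = "Febbre1" then some 2 else if s = "Raffreddore1" then some 4
     else if s = "Trauma1" then some 2 else none) := by
  simp only [pvTriageSintomi, PySem.Dict.get?_mk_cons]
  split_ifs <;> simp_all [PySem.Dict.get?] <;> rfl

lemma pvSatPm (s : String) : (pvTriageSat.get? s).map pvPm =
    (if s = "Saturazione1" then some 1 else if s = "Saturazione2" then some 2
     else if s = "Saturazione3" then some 3 else none) := by
  simp only [pvTriageSat, PySem.Dict.get?_mk_cons]
  split_ifs <;> simp_all [PySem.Dict.get?] <;> rfl

lemma pvFcPm (s : String) : (pvTriageFc.get? s).map pvPm =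
    (if s = "FCminore40" then some 1 else if s = "FC40-49" then some 2
     else if s = "FC50-59" then some 3 else if s = "FC60-100" then some 4
     else if s = "FC101-120" then some 3 else if s = "FC121-140" then some 2
     else if s = "FCMaggiore140" then some 1 else none) := by
  simp only [pvTriageFc, PySem.Dict.get?_mk_cons]
  split_ifs <;> simp_all [PySem.Dict.get?] <;> rfl

-- pointwise characterisations of 'symptom contributes priority k'
lemma pvS1 (s : String) : (pvTriageSintomi.get? s).map pvPm = some 1 ↔
    (s = "DifficoltaRespiratoria1" ∨ s = "DoloreToracico1") := by
  rw [pvSintPm]; split_ifs <;> simp_all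
lemma pvS2 (s : String) : (pvTriageSintomi.get? s).map pvPm = some 2 ↔
    (s = "Febbre1" ∨ s = "Trauma1") := by
  rw [pvSintPm]; split_ifs <;> simp_all
lemma pvS3 (s : String) : (pvTriageSintomi.get? s).map pvPm = some 3 ↔ False := by
  rw [pvSintPm]; split_ifs <;> simp_all

-- the sat/fc stage of A contributes exactly the pvL2/pvL3 lists
lemma pvSatStage (tf : String) (htf : tf ∈ pvNames) (oid : Option String) :
    (match oid with
      | some sid => if sid ≠ "" then pvStepA pvTriageSat tf sid else tf
      | none => tf) ∈ pvNames ∧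
      pvPm (match oid with
        | some sid => if sid ≠ "" then pvStepA pvTriageSat tf sid else tf
        | none => tf) = (pvL2 oid).foldl min (pvPm tf) := by
  cases oid with
  | none => exact ⟨htf, rfl⟩
  | some sid =>
    dsimp only
    by_cases hs : sid = ""
    · subst hs
      simp only [ne_eq, not_true_eq_false, if_false]
      exact ⟨htf, by simp [pvL2]⟩
    · simp only [ne_eq, hs, not_false_iff, if_true]
      obtain ⟨g1, g2⟩ := pvStepA_min pvTriageSat pvSat_names tf sid htf
      refine ⟨g1, ?_⟩
      rw [g2]
      have := pvSatPm sid
      cases h : pvTriageSat.get? sid with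
      | none =>
        rw [h] at this
        simp only [pvL2, Option.map_none] at this ⊢
        split_ifs at this <;> simp_all
      | some c =>
        rw [h] at this
        simp only [pvL2, Option.map_some] at this ⊢
        split_ifs at this <;> simp_all
lemma pvFcStage (tf : String) (htf : tf ∈ pvNames) (oid : Option String) :
    (match oid with
      | some fid => if fid ≠ "" then pvStepA pvTriageFc tf fid else tf
      | none => tf) ∈ pvNames ∧
      pvPm (match oid with
        | some fid => if fid ≠ "" then pvStepA pvTriageFc tf fid else tf
        | none => tf) = (pvL3 oid).foldl min (pvPm tf) := by
  cases oid with
  | none => exact ⟨htf, rfl⟩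
  | some fid =>
    dsimp only
    by_cases hs : fid = ""
    · subst hs
      simp only [ne_eq, not_true_eq_false, if_false]
      exact ⟨htf, by simp [pvL3]⟩
    · simp only [ne_eq, hs, not_false_iff, if_true]
      obtain ⟨g1, g2⟩ := pvStepA_min pvTriageFc pvFc_names tf fid htf
      refine ⟨g1, ?_⟩
      rw [g2]
      have := pvFcPm fid
      cases h : pvTriageFc.get? fid with
      | none =>
        rw [h] at this
        simp only [pvL3, Option.map_none] at this ⊢
        split_ifs at this <;> simp_all
      | some c =>
        rw [h] at this
        simp only [pvL3, Option.map_some] at this ⊢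
        split_ifs at this <;> simp_all

-- A's result: a colour name whose priority is the min-fold of all contributions, seeded with 4
lemma pvA_pm (ids : List String) (sat fc : Option String) :
    calcola_triage ids sat fc ∈ pvNames ∧
      pvPm (calcola_triage ids sat fc) = (pvL1 ids ++ pvL2 sat ++ pvL3 fc).foldl min 4 := by
  unfold calcola_triage
  obtain ⟨h1, h2⟩ := pvFold_sint ids "Bianco" (by simp [pvNames])
  obtain ⟨s1, s2⟩ := pvSatStage _ h1 sat
  obtain ⟨f1, f2⟩ := pvFcStage _ s1 fc
  refine ⟨f1, ?_⟩
  rw [List.foldl_append, List.foldl_append]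
  rw [f2, s2, h2]
  rfl

-- characterisation of the min-fold over priorities 1..4 seeded with 4
lemma pvMinChar (L : List Int) (h : ∀ x ∈ L, 1 ≤ x ∧ x ≤ 4) :
    L.foldl min 4 = (if (1:Int) ∈ L then 1 else if (2:Int) ∈ L then 2
      else if (3:Int) ∈ L then 3 else 4) := by
  have gen : ∀ (L : List Int), (∀ x ∈ L, 1 ≤ x ∧ x ≤ 4) → ∀ a : Int, 1 ≤ a → a ≤ 4 →
      L.foldl min a = min a (if (1:Int) ∈ L then 1 else if (2:Int) ∈ L then 2
        else if (3:Int) ∈ L then 3 else 4) := by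
    intro L
    induction L with
    | nil =>
      intro _ a h1 h4
      simp only [List.foldl_nil, List.not_mem_nil, if_false]
      omega
    | cons x L ih =>
      intro hall a h1 h4
      obtain ⟨hx1, hx4⟩ := hall x (by simp)
      have hL : ∀ y ∈ L, 1 ≤ y ∧ y ≤ 4 := fun y hy => hall y (by simp [hy])
      simp only [List.foldl_cons]
      rw [ih hL (min a x) (by omega) (by omega)]
      simp only [List.mem_cons]
      by_cases e1 : (1:Int) ∈ L <;> by_cases e2 : (2:Int) ∈ L <;> by_cases e3 : (3:Int) ∈ L <;>
        simp only [e1, e2, e3, or_true, or_false, if_true, if_false] <;>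
        simp only [min_def] <;> split_ifs <;> omega
  rw [gen L h 4 (by norm_num) (by norm_num)]
  split_ifs <;> decide

-- every contribution is one of the priorities 1..4
lemma pvBounds (ids : List String) (sat fc : Option String) :
    ∀ x ∈ pvL1 ids ++ pvL2 sat ++ pvL3 fc, 1 ≤ x ∧ x ≤ 4 := by
  intro x hx
  rcases List.mem_append.1 hx with hx | hx3
  · rcases List.mem_append.1 hx with hx1 | hx2
    · obtain ⟨s, _, hs⟩ := List.mem_filterMap.1 hx1
      rw [pvSintPm] at hs
      split_ifs at hs <;> simp_all <;> omega
    · unfold pvL2 at hx2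
      cases sat <;> simp_all <;> split_ifs at hx2 <;> simp_all
  · unfold pvL3 at hx3
    cases fc <;> simp_all <;> split_ifs at hx3 <;> simp_all

-- the name a given priority 1..4 stands for
lemma pvName_of_pm (tf : String) (htf : tf ∈ pvNames) :
    tf = (if pvPm tf = 1 then "Rosso" else if pvPm tf = 2 then "Giallo"
          else if pvPm tf = 3 then "Verde" else "Bianco") := by
  simp only [pvNames, List.mem_cons, List.not_mem_nil, or_false] at htf
  rcases htf with rfl | rfl | rfl | rfl <;> decide

-- membership of each priority in the three contribution lists, as input conditions
lemma pvMem1L1 (ids : List String) : (1:Int) ∈ pvL1 ids ↔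
    ∃ s ∈ ids, s = "DifficoltaRespiratoria1" ∨ s = "DoloreToracico1" := by
  simp only [pvL1, List.mem_filterMap]
  exact ⟨fun ⟨s, hs, h⟩ => ⟨s, hs, (pvS1 s).mp h⟩, fun ⟨s, hs, h⟩ => ⟨s, hs, (pvS1 s).mpr h⟩⟩
lemma pvMem2L1 (ids : List String) : (2:Int) ∈ pvL1 ids ↔
    ∃ s ∈ ids, s = "Febbre1" ∨ s = "Trauma1" := by
  simp only [pvL1, List.mem_filterMap]
  exact ⟨fun ⟨s, hs, h⟩ => ⟨s, hs, (pvS2 s).mp h⟩, fun ⟨s, hs, h⟩ => ⟨s, hs, (pvS2 s).mpr h⟩⟩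
lemma pvMem3L1 (ids : List String) : (3:Int) ∈ pvL1 ids ↔ False := by
  simp only [pvL1, List.mem_filterMap]
  exact ⟨fun ⟨s, _, h⟩ => (pvS3 s).mp h, False.elim⟩
lemma pvMem1L2 (oid : Option String) : (1:Int) ∈ pvL2 oid ↔ oid = some "Saturazione1" := by
  unfold pvL2; cases oid <;> simp <;> split_ifs <;> simp_all
lemma pvMem2L2 (oid : Option String) : (2:Int) ∈ pvL2 oid ↔ oid = some "Saturazione2" := by
  unfold pvL2; cases oid <;> simp <;> split_ifs <;> simp_all
lemma pvMem3L2 (oid : Option String) : (3:Int) ∈ pvL2 oid ↔ oid = some "Saturazione3" := by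
  unfold pvL2; cases oid <;> simp <;> split_ifs <;> simp_all
lemma pvMem1L3 (oid : Option String) : (1:Int) ∈ pvL3 oid ↔
    oid = some "FCminore40" ∨ oid = some "FCMaggiore140" := by
  unfold pvL3; cases oid <;> simp <;> split_ifs <;> simp_all
lemma pvMem2L3 (oid : Option String) : (2:Int) ∈ pvL3 oid ↔
    oid = some "FC40-49" ∨ oid = some "FC121-140" := by
  unfold pvL3; cases oid <;> simp <;> split_ifs <;> simp_all
lemma pvMem3L3 (oid : Option String) : (3:Int) ∈ pvL3 oid ↔
    oid = some "FC50-59" ∨ oid = some "FC101-120" := by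
  unfold pvL3; cases oid <;> simp <;> split_ifs <;> simp_all

-- B's three rows hit exactly when the corresponding priority is among the contributions
lemma pvHit1 (ids : List String) (sat fc : Option String) :
    pvHit ids sat fc
      ("Rosso", ["DifficoltaRespiratoria1", "DoloreToracico1"], ["Saturazione1"],
        ["FCminore40", "FCMaggiore140"]) = true ↔
      (1:Int) ∈ pvL1 ids ++ pvL2 sat ++ pvL3 fc := by
  rw [List.mem_append, List.mem_append, pvMem1L1, pvMem1L2, pvMem1L3]
  simp only [pvHit, Bool.or_eq_true, List.any_eq_true, List.contains_iff_mem, List.mem_cons,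
    List.not_mem_nil, or_false]
  cases sat <;> cases fc <;> simp_all

lemma pvHit2 (ids : List String) (sat fc : Option String) :
    pvHit ids sat fc
      ("Giallo", ["Febbre1", "Trauma1"], ["Saturazione2"], ["FC40-49", "FC121-140"]) = true ↔
      (2:Int) ∈ pvL1 ids ++ pvL2 sat ++ pvL3 fc := by
  rw [List.mem_append, List.mem_append, pvMem2L1, pvMem2L2, pvMem2L3]
  simp only [pvHit, Bool.or_eq_true, List.any_eq_true, List.contains_iff_mem, List.mem_cons,
    List.not_mem_nil, or_false]
  cases sat <;> cases fc <;> simp_all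

lemma pvHit3 (ids : List String) (sat fc : Option String) :
    pvHit ids sat fc
      ("Verde", [], ["Saturazione3"], ["FC50-59", "FC101-120"]) = true ↔
      (3:Int) ∈ pvL1 ids ++ pvL2 sat ++ pvL3 fc := by
  rw [List.mem_append, List.mem_append, pvMem3L1, pvMem3L2, pvMem3L3]
  simp only [pvHit, Bool.or_eq_true, List.any_eq_true, List.contains_iff_mem,
    List.not_mem_nil]
  cases sat <;> cases fc <;> simp_all

-- B as a severity-ordered if-chain over the membership conditions
lemma pvB_char (ids : List String) (sat fc : Option String) :
    calcola_triage_alt ids sat fc =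
      (if (1:Int) ∈ pvL1 ids ++ pvL2 sat ++ pvL3 fc then "Rosso"
       else if (2:Int) ∈ pvL1 ids ++ pvL2 sat ++ pvL3 fc then "Giallo"
       else if (3:Int) ∈ pvL1 ids ++ pvL2 sat ++ pvL3 fc then "Verde" else "Bianco") := by
  unfold calcola_triage_alt
  simp only [pvLivelli, List.find?]
  by_cases c1 : (1:Int) ∈ pvL1 ids ++ pvL2 sat ++ pvL3 fc
  · rw [(pvHit1 ids sat fc).mpr c1, if_pos c1]
  · rw [Bool.eq_false_iff.mpr (fun h => c1 ((pvHit1 ids sat fc).mp h)), if_neg c1]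
    by_cases c2 : (2:Int) ∈ pvL1 ids ++ pvL2 sat ++ pvL3 fc
    · rw [(pvHit2 ids sat fc).mpr c2, if_pos c2]
    · rw [Bool.eq_false_iff.mpr (fun h => c2 ((pvHit2 ids sat fc).mp h)), if_neg c2]
      by_cases c3 : (3:Int) ∈ pvL1 ids ++ pvL2 sat ++ pvL3 fc
      · rw [(pvHit3 ids sat fc).mpr c3, if_pos c3]
      · rw [Bool.eq_false_iff.mpr (fun h => c3 ((pvHit3 ids sat fc).mp h)), if_neg c3]

-- ===== VERDICT (by name: the statement is the Claim_ definition above) =====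
theorem calcola_triage_spec : Claim_equal_calcola_triage := by
  intro sintomi_ids sat_id fc_id hdom
  clear hdom
  unfold Spec_calcola_triage
  obtain ⟨hn, hp⟩ := pvA_pm sintomi_ids sat_id fc_id
  rw [pvB_char, pvName_of_pm _ hn, hp, pvMinChar _ (pvBounds sintomi_ids sat_id fc_id)]
  split_ifs <;> simp_all
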